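-- pv_equiv track=rewrite | github.com/heungh/db_assistant_mcp | modules/error_analyzer.py | split_log_content
-- ===== SOURCE A (Python) =====
-- from typing import Dict, List, Any, Optional, Tuple
--
-- def split_log_content(log_lines: List[str], max_chars: int = 100000) -> List[str]:
--     """
--     로그 내용을 최대 문자수로 분할
--
--     Args:
--         log_lines: 로그 라인 리스트
--         max_chars: 최대 문자수
--
--     Returns:
--         분할된 로그 내용 리스트
--     """
--     chunks = []
--     current_chunk = []
--     current_size = 0
--
--     for line in log_lines:
--         line_size = len(line)
--
--         if current_size + line_size > max_chars and current_chunk: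
--             # 현재 청크 저장
--             chunks.append('\n'.join(current_chunk))
--             current_chunk = []
--             current_size = 0
--
--         current_chunk.append(line)
--         current_size += line_size
--
--     # 마지막 청크
--     if current_chunk:
--         chunks.append('\n'.join(current_chunk))
--
--     return chunks
-- ===== SOURCE B (Python) =====
-- def split_log_content(log_lines, max_chars=100000):
--     """Chunk-at-a-time: greedily consume one whole chunk per outer iteration
--     from a single shared iterator, instead of threading a chunk accumulator
--     through one fold over all lines."""
--     chunks = []
--     it = iter(log_lines)
--     pending = next(it, None)
--     while pending is not None:
--         chunk = [pending]
--         size = len(pending)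
--         pending = None
--         for line in it:
--             if size + len(line) > max_chars:
--                 pending = line
--                 break
--             chunk.append(line)
--             size += len(line)
--         chunks.append('\n'.join(chunk))
--     return chunks
-- ===== Notes on version B (the rewrite author's own statement) =====
-- stated objective: alternative
-- what changed: Replaces A's single fold that threads (chunks, current_chunk, current_size) through every line by an outer per-chunk loop that greedily consumes one whole chunk at a time from a shared iterator (pending line carried across chunk boundaries); same O(total chars) cost.
import Mathlib
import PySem

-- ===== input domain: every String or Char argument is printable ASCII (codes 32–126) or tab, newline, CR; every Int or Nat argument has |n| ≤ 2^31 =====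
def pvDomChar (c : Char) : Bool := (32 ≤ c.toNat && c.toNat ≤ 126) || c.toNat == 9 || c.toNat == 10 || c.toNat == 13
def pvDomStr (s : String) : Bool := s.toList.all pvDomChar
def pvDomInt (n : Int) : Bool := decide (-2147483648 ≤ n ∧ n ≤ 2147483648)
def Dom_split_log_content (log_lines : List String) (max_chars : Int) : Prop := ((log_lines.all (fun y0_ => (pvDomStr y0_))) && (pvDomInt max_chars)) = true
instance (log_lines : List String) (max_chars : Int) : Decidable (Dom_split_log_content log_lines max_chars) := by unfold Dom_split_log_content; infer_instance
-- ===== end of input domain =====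

-- ===== PORT A =====
-- B replaces A's single fold threading (chunks, current_chunk, size) by an outer
-- per-chunk recursion with an inner greedy take — alternative decomposition, same cost.
def split_log_content (log_lines : List String) (max_chars : Int) : List String :=
  let st := log_lines.foldl
    (fun (st : List String × List String × Int) line =>
      let chunks := st.1
      let cur := st.2.1
      let sz := st.2.2
      let n := PySem.Str.len line
      if max_chars < sz + n ∧ cur ≠ [] then
        (chunks ++ [PySem.Str.join "\n" cur], [line], n)
      else
        (chunks, cur ++ [line], sz + n))
    ([], [], 0)
  if st.2.1 ≠ [] then st.1 ++ [PySem.Str.join "\n" st.2.1] else st.1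

-- ===== PORT B =====
-- inner 'for line in it: …' loop: extend the chunk until the next line overflows;
-- returns (finished chunk, remaining lines, i.e. the pending line followed by the rest of the iterator)
def slcTake (max_chars : Int) : List String → List String → Int → List String × List String
  | [], chunk, _ => (chunk, [])
  | line :: rest, chunk, size =>
    if max_chars < size + PySem.Str.len line then (chunk, line :: rest)
    else slcTake max_chars rest (chunk ++ [line]) (size + PySem.Str.len line)

theorem slcTake_rest_le (max_chars : Int) :
    ∀ (ls chunk : List String) (size : Int),
      (slcTake max_chars ls chunk size).2.length ≤ ls.length := by
  intro ls
  induction ls with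
  | nil => intro chunk size; simp [slcTake]
  | cons l rest ih =>
    intro chunk size
    simp only [slcTake]
    split
    · simp
    · exact le_trans (ih _ _) (by simp)

-- outer 'while pending is not None' loop: one chunk per step
def slcGo (max_chars : Int) : List String → List String
  | [] => []
  | pending :: rest =>
    let t := slcTake max_chars rest [pending] (PySem.Str.len pending)
    PySem.Str.join "\n" t.1 :: slcGo max_chars t.2
termination_by ls => ls.length
decreasing_by
  exact Nat.lt_succ_of_le (slcTake_rest_le _ _ _ _)

def split_log_content_alt (log_lines : List String) (max_chars : Int) : List String :=
  slcGo max_chars log_lines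

-- ===== PRECONDITION & SPEC =====
def Spec_split_log_content (log_lines : List String) (max_chars : Int) (out : List String) : Prop := out = split_log_content_alt log_lines max_chars
instance (log_lines : List String) (max_chars : Int) (out : List String) : Decidable (Spec_split_log_content log_lines max_chars out) := by unfold Spec_split_log_content; infer_instance

-- ===== CLAIM (what is proved, stated in full; the proofs are below) =====
def Claim_equal_split_log_content : Prop := ∀ (log_lines : List String) (max_chars : Int), Dom_split_log_content log_lines max_chars → Spec_split_log_content log_lines max_chars (split_log_content log_lines max_chars)

-- ===== LEMMAS AND PROOFS =====

-- the loop invariant: with a non-empty current chunk, finishing A's fold produces the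
-- current chunk completed by slcTake followed by slcGo on the leftover lines
theorem fold_eq_take_go (max_chars : Int) :
    ∀ (ls : List String) (chunks cur : List String) (size : Int), cur ≠ [] →
      (fun st : List String × List String × Int =>
        if st.2.1 ≠ [] then st.1 ++ [PySem.Str.join "\n" st.2.1] else st.1)
       (ls.foldl
        (fun (st : List String × List String × Int) line =>
          if max_chars < st.2.2 + PySem.Str.len line ∧ st.2.1 ≠ [] then
            (st.1 ++ [PySem.Str.join "\n" st.2.1], [line], PySem.Str.len line)
          else (st.1, st.2.1 ++ [line], st.2.2 + PySem.Str.len line))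
        (chunks, cur, size))
      = chunks ++ PySem.Str.join "\n" (slcTake max_chars ls cur size).1
          :: slcGo max_chars (slcTake max_chars ls cur size).2 := by
  intro ls
  induction ls with
  | nil =>
    intro chunks cur size hcur
    simp [slcTake, slcGo, List.foldl, hcur]
  | cons l rest ih =>
    intro chunks cur size hcur
    rw [slcTake]
    simp only [List.foldl_cons]
    by_cases h : max_chars < size + PySem.Str.len l
    · rw [if_pos (show max_chars < size + PySem.Str.len l ∧ cur ≠ [] from ⟨h, hcur⟩), if_pos h]
      have H := ih (chunks ++ [PySem.Str.join "\n" cur]) [l] (PySem.Str.len l) (by simp)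
      simp only at H ⊢
      rw [H, slcGo]
      simp
    · have hc : ¬ (max_chars < size + PySem.Str.len l ∧ cur ≠ []) := fun hh => h hh.1
      rw [if_neg hc, if_neg h]
      have H := ih chunks (cur ++ [l]) (size + PySem.Str.len l) (by simp)
      simp only at H ⊢
      exact H

-- ===== VERDICT (by name: the statement is the Claim_ definition above) =====
theorem split_log_content_spec : Claim_equal_split_log_content := by
  intro log_lines max_chars _
  unfold Spec_split_log_content split_log_content split_log_content_alt
  cases log_lines with
  | nil => simp [slcGo]
  | cons l rest =>
    simp only [List.foldl]
    have h0 : ¬ (max_chars < 0 + PySem.Str.len l ∧ ([] : List String) ≠ []) := by simp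
    rw [if_neg h0]
    have H := fold_eq_take_go max_chars rest [] ([] ++ [l]) ((0:Int) + PySem.Str.len l) (by simp)
    simp only at H
    rw [H, slcGo]
    simp
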